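-- pv_equiv track=rewrite | github.com/Zehvogel/advent2023 | day1/solution.py | replace_first_found
-- ===== SOURCE A (Python) =====
-- def replace_first_found(l):
--     word_list = ["one", "two", "three", "four", "five", "six", "seven", "eight", "nine"]
--     words = {word:str(i+1) for i, word in enumerate(word_list)}
--     lowest_idx = len(l)
--     word = ""
--     for w in words:
--         idx = l.find(w)
--         if idx >= 0 and idx < lowest_idx:
--             lowest_idx = idx
--             word = w
--     return l.replace(word, word[0] + words[word] + word[-1]) if word != "" else l
-- ===== SOURCE B (Python) =====
-- def replace_first_found(l):
--     reps = [("one", "o1e"), ("two", "t2o"), ("three", "t3e"),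
--             ("four", "f4r"), ("five", "f5e"), ("six", "s6x"),
--             ("seven", "s7n"), ("eight", "e8t"), ("nine", "n9e")]
--     for pos in range(len(l)):
--         for w, rep in reps:
--             if l.startswith(w, pos):
--                 return l.replace(w, rep)
--     return l
-- ===== Notes on version B (the rewrite author's own statement) =====
-- stated objective: alternative
-- what changed: Instead of computing find() for each of the nine digit words and tracking the minimum index, B scans string positions left to right and returns at the first position where some word is a prefix (startswith with offset), using a precomputed word->replacement table instead of rebuilding word[0]+digit+word[-1].
import Mathlib
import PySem

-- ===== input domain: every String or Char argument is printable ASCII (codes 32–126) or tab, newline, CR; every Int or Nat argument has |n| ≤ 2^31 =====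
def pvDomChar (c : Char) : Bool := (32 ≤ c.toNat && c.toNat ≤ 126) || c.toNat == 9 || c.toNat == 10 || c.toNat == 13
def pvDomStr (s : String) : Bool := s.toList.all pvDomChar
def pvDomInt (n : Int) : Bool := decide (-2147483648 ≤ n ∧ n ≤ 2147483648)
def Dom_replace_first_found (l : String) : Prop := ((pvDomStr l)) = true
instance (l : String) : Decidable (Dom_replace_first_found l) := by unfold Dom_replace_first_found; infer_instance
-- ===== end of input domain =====

-- B replaces A's nine-find()-minimum loop by a single left-to-right positional scan with a
-- precomputed word→replacement table (objective: alternative decomposition, similar cost).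

-- ===== PORT A =====
-- w[i] as Python's 1-character string slice, as a char list ([] only when out of range;
-- A only evaluates it with word ≠ "" and i ∈ {0, -1}, where Python returns a 1-char string)
def pyCharList (w : String) (i : Int) : List Char :=
  match PySem.Str.pyGet? w i with
  | some c => [c]
  | none => []

def pvWordList : List String :=
  ["one","two","three","four","five","six","seven","eight","nine"]

-- words = {word: str(i+1) for i, word in enumerate(word_list)}
def pvWords : PySem.Dict String String :=
  (PySem.List.enumerate pvWordList).foldl
    (fun d iw => d.insert iw.2 (PySem.Int.toStr (iw.1 + 1))) PySem.Dict.empty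

def replace_first_found (l : String) : String :=
  -- for w in words: idx = l.find(w); if idx >= 0 and idx < lowest_idx: update
  let st := (PySem.Dict.keys pvWords).foldl
    (fun (st : Int × String) w =>
      let idx := PySem.Str.find l w
      if 0 ≤ idx ∧ idx < st.1 then (idx, w) else st)
    ((PySem.Str.len l), "")
  -- return l.replace(word, word[0] + words[word] + word[-1]) if word != "" else l
  if st.2 ≠ "" then
    PySem.Str.replace l st.2
      (String.ofList (pyCharList st.2 0 ++ (pvWords.getD st.2 "").toList ++ pyCharList st.2 (-1)))
  else l

-- ===== PORT B =====
def pvReps : List (String × String) :=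
  [("one","o1e"),("two","t2o"),("three","t3e"),("four","f4r"),("five","f5e"),
   ("six","s6x"),("seven","s7n"),("eight","e8t"),("nine","n9e")]

def replace_first_found_alt (l : String) : String :=
  -- for pos in range(len(l)): for w, rep in reps: if l.startswith(w, pos): return l.replace(w, rep)
  -- l.startswith(w, pos) with 0 ≤ pos ≤ len(l) is exactly startswith of the suffix from pos
  match (List.range l.toList.length).findSome? (fun pos =>
      pvReps.find? (fun p => PySem.Chars.startswith (l.toList.drop pos) p.1.toList)) with
  | some (w, rep) => PySem.Str.replace l w rep
  | none => l

-- ===== PRECONDITION & SPEC =====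
def Spec_replace_first_found (l : String) (out : String) : Prop := out = replace_first_found_alt l
instance (l : String) (out : String) : Decidable (Spec_replace_first_found l out) := by unfold Spec_replace_first_found; infer_instance

-- ===== CLAIM (what is proved, stated in full; the proofs are below) =====
def Claim_equal_replace_first_found : Prop := ∀ (l : String), Dom_replace_first_found l → Spec_replace_first_found l (replace_first_found l)

-- ===== LEMMAS AND PROOFS =====

-- A's loop body, written over char lists
def stepA (cs : List Char) (st : Int × String) (w : String) : Int × String :=
  if 0 ≤ PySem.Chars.find cs w.toList ∧ PySem.Chars.find cs w.toList < st.1 then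
    (PySem.Chars.find cs w.toList, w)
  else st

lemma foldA_eq (l : String) (init : Int × String) :
    (PySem.Dict.keys pvWords).foldl
      (fun (st : Int × String) w =>
        let idx := PySem.Str.find l w
        if 0 ≤ idx ∧ idx < st.1 then (idx, w) else st) init
    = pvWordList.foldl (stepA l.toList) init := by
  have hk : PySem.Dict.keys pvWords = pvWordList := by decide
  rw [hk]
  have hf : (fun (st : Int × String) w =>
      let idx := PySem.Str.find l w
      if 0 ≤ idx ∧ idx < st.1 then (idx, w) else st) = stepA l.toList := by
    funext st w
    simp [stepA, PySem.Str.find_eq]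
  rw [hf]

lemma fold_no_update (cs : List Char) (ws : List String) (st : Int × String)
    (h : ∀ w ∈ ws, ¬ (0 ≤ PySem.Chars.find cs w.toList ∧ PySem.Chars.find cs w.toList < st.1)) :
    ws.foldl (stepA cs) st = st := by
  induction ws with
  | nil => rfl
  | cons w ws ih =>
    have hw := h w (by simp)
    simp only [List.foldl_cons, stepA, if_neg hw]
    exact ih (fun v hv => h v (by simp [hv]))

lemma fold_min (cs : List Char) (ws : List String) (st : Int × String) (w0 : String)
    (hmem : w0 ∈ ws)
    (h0 : 0 ≤ PySem.Chars.find cs w0.toList)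
    (hlt : PySem.Chars.find cs w0.toList < st.1)
    (huniq : ∀ w ∈ ws, w ≠ w0 →
      PySem.Chars.find cs w.toList = -1 ∨ PySem.Chars.find cs w0.toList < PySem.Chars.find cs w.toList) :
    ws.foldl (stepA cs) st = (PySem.Chars.find cs w0.toList, w0) := by
  induction ws generalizing st with
  | nil => cases hmem
  | cons w ws ih =>
    by_cases hw : w = w0
    · subst hw
      simp only [List.foldl_cons, stepA]
      rw [if_pos (And.intro h0 hlt)]
      apply fold_no_update
      intro v hv hcond
      rcases eq_or_ne v w with hv0 | hv0
      · subst hv0; exact absurd hcond.2 (lt_irrefl _)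
      · rcases huniq v (by simp [hv]) hv0 with hneg | hgt
        · rw [hneg] at hcond; omega
        · exact absurd hcond.2 (not_lt.mpr (le_of_lt hgt))
    · have hmem' : w0 ∈ ws := by
        rcases List.mem_cons.mp hmem with h | h
        · exact absurd h.symm hw
        · exact h
      have huniq' : ∀ v ∈ ws, v ≠ w0 →
          PySem.Chars.find cs v.toList = -1 ∨ PySem.Chars.find cs w0.toList < PySem.Chars.find cs v.toList :=
        fun v hv => huniq v (by simp [hv])
      simp only [List.foldl_cons, stepA]
      split_ifs with hcond
      · -- updated to (F w, w); invariant: F w0 < F w since w ≠ w0 and found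
        rcases huniq w (by simp) hw with hneg | hgt
        · rw [hneg] at hcond; omega
        · exact ih _ hmem' hgt huniq'
      · exact ih _ hmem' hlt huniq'

-- first position whose suffix some digit word starts
def hasRep (cs : List Char) (j : Nat) : Prop := ∃ p ∈ pvReps, p.1.toList <+: cs.drop j

lemma find?_unique {α : Type} (pred : α → Bool) (ps : List α) (p0 : α)
    (hmem : p0 ∈ ps) (hp : pred p0 = true) (hu : ∀ p ∈ ps, pred p = true → p = p0) :
    ps.find? pred = some p0 := by
  induction ps with
  | nil => cases hmem
  | cons q ps ih =>
    by_cases hq : pred q = true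
    · rw [List.find?_cons_of_pos hq, hu q (by simp) hq]
    · rw [List.find?_cons_of_neg hq]
      have hmem' : p0 ∈ ps := by
        rcases List.mem_cons.mp hmem with h | h
        · subst h; exact absurd hp hq
        · exact h
      exact ih hmem' (fun p hpm => hu p (by simp [hpm]))

lemma findSome?_range_none {α : Type} (g : Nat → Option α) (n : Nat)
    (h : ∀ i < n, g i = none) : (List.range n).findSome? g = none :=
  List.findSome?_eq_none_iff.mpr (fun i hi => h i (List.mem_range.mp hi))

lemma findSome?_range_min {α : Type} (g : Nat → Option α) (j n : Nat) (hj : j < n)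
    (hg : g j ≠ none) (hmin : ∀ i < j, g i = none) : (List.range n).findSome? g = g j := by
  have hsplit : List.range n = List.range (j + 1) ++ (List.range (n - (j + 1))).map ((j + 1) + ·) := by
    rw [← List.range_add]; congr 1; omega
  have h1 : (List.range (j + 1)).findSome? g = g j := by
    rw [List.range_succ, List.findSome?_append, findSome?_range_none g j hmin]
    simp
  rw [hsplit, List.findSome?_append, h1]
  cases hgj : g j with
  | none => exact absurd hgj hg
  | some a => simp

-- the nine words: nonempty, none a prefix of another, and they match pvWords/pvWordList
lemma reps_nonempty : ∀ p ∈ pvReps, p.1.toList ≠ [] := by decide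
lemma reps_no_prefix : ∀ p ∈ pvReps, ∀ q ∈ pvReps, p.1.toList <+: q.1.toList → p = q := by decide
lemma reps_fst_mem : ∀ p ∈ pvReps, p.1 ∈ pvWordList := by decide
lemma wordList_covered : ∀ w ∈ pvWordList, ∃ p ∈ pvReps, p.1 = w := by decide
lemma reps_fst_ne_empty : ∀ p ∈ pvReps, p.1 ≠ "" := by decide
lemma reps_build : ∀ p ∈ pvReps,
    String.ofList (pyCharList p.1 0 ++ (pvWords.getD p.1 "").toList ++ pyCharList p.1 (-1)) = p.2 := by
  decide

lemma drop_infix (cs : List Char) (j : Nat) (w : List Char) (h : w <+: cs.drop j) : w <:+: cs :=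
  (h.isInfix).trans (List.drop_suffix j cs).isInfix

lemma find_eq_of_min (cs : List Char) (w : List Char) (j : Nat)
    (hpre : w <+: cs.drop j) (hmin : ∀ i < j, ¬ w <+: cs.drop i) :
    PySem.Chars.find cs w = (j : Int) := by
  have h0 : 0 ≤ PySem.Chars.find cs w :=
    (PySem.Chars.find_nonneg_iff cs w).mpr (drop_infix cs j w hpre)
  obtain ⟨hpF, hminF⟩ := PySem.Chars.find_spec h0
  have hle : (PySem.Chars.find cs w).toNat ≤ j := by
    by_contra h
    exact hminF j (by omega) hpre
  have hge : j ≤ (PySem.Chars.find cs w).toNat := by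
    by_contra h
    exact hmin _ (by omega) hpF
  omega

theorem replace_first_found_spec : Claim_equal_replace_first_found := by
  unfold Claim_equal_replace_first_found
  intro l _
  unfold Spec_replace_first_found replace_first_found replace_first_found_alt
  rw [foldA_eq]
  set cs := l.toList with hcs
  by_cases hex : ∃ j, hasRep cs j
  · -- some digit word occurs; j* = first such position
    classical
    set j := Nat.find hex with hj
    obtain ⟨p0, hp0mem, hp0pre⟩ := Nat.find_spec hex
    have hmin : ∀ i < j, ¬ hasRep cs i := fun i hi => Nat.find_min hex hi
    -- unique matching pair at position j
    have huniqAt : ∀ p ∈ pvReps, p.1.toList <+: cs.drop j → p = p0 := by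
      intro p hpm hppre
      rcases List.prefix_or_prefix_of_prefix hppre hp0pre with h | h
      · exact reps_no_prefix p hpm p0 hp0mem h
      · exact (reps_no_prefix p0 hp0mem p hpm h).symm
    -- j < length
    have hjn : j < cs.length := by
      have hne : cs.drop j ≠ [] := by
        intro hnil
        exact reps_nonempty p0 hp0mem (List.prefix_nil.mp (hnil ▸ hp0pre))
      have : ¬ (cs.length ≤ j) := fun hle => hne (List.drop_eq_nil_iff.mpr hle)
      omega
    -- A's find value for the winner and for the others
    have hF0 : PySem.Chars.find cs p0.1.toList = (j : Int) := by
      apply find_eq_of_min cs _ j hp0pre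
      intro i hi hpre
      exact hmin i hi ⟨p0, hp0mem, hpre⟩
    have hFother : ∀ p ∈ pvReps, p ≠ p0 →
        PySem.Chars.find cs p.1.toList = -1 ∨ (j : Int) < PySem.Chars.find cs p.1.toList := by
      intro p hpm hne
      by_cases hin : 0 ≤ PySem.Chars.find cs p.1.toList
      · right
        obtain ⟨hpF, _⟩ := PySem.Chars.find_spec hin
        have hjle : j ≤ (PySem.Chars.find cs p.1.toList).toNat := by
          by_contra h
          exact hmin _ (by omega) ⟨p, hpm, hpF⟩
        have hneq : (PySem.Chars.find cs p.1.toList).toNat ≠ j := by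
          intro heq
          exact hne (huniqAt p hpm (heq ▸ hpF))
        omega
      · left
        have := PySem.Chars.neg_one_le_find cs p.1.toList
        omega
    -- evaluate A's fold
    have hlen : PySem.Str.len l = (cs.length : Int) := by simp [hcs]
    have hfold : pvWordList.foldl (stepA cs) ((PySem.Str.len l), "") = ((j : Int), p0.1) := by
      rw [hlen]
      have hmem : p0.1 ∈ pvWordList := reps_fst_mem p0 hp0mem
      have huniqW : ∀ w ∈ pvWordList, w ≠ p0.1 →
          PySem.Chars.find cs w.toList = -1 ∨
            PySem.Chars.find cs p0.1.toList < PySem.Chars.find cs w.toList := by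
        intro w hwm hwne
        obtain ⟨p, hpm, hpw⟩ := wordList_covered w hwm
        have hpne : p ≠ p0 := fun h => hwne (by rw [← hpw, h])
        rw [← hpw, hF0]
        exact hFother p hpm hpne
      have := fold_min cs pvWordList ((cs.length : Int), "") p0.1 hmem
        (by rw [hF0]; omega) (by rw [hF0]; show (j:Int) < (cs.length:Int); exact_mod_cast hjn) huniqW
      rw [hF0] at this
      exact this
    rw [hfold]
    -- evaluate B's scan
    have hfindj : pvReps.find? (fun p => PySem.Chars.startswith (cs.drop j) p.1.toList) = some p0 := by
      apply find?_unique _ _ p0 hp0mem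
      · exact (PySem.Chars.startswith_iff _ _).mpr hp0pre
      · intro p hpm hpp
        exact huniqAt p hpm ((PySem.Chars.startswith_iff _ _).mp hpp)
    have hscan : (List.range cs.length).findSome? (fun pos =>
        pvReps.find? (fun p => PySem.Chars.startswith (cs.drop pos) p.1.toList)) = some p0 := by
      rw [findSome?_range_min _ j cs.length hjn (by simp [hfindj])
        (fun i hi => List.find?_eq_none.mpr
          (fun p hpm hpp => absurd ⟨p, hpm, (PySem.Chars.startswith_iff _ _).mp hpp⟩ (hmin i hi)))]
      exact hfindj
    rw [hscan]
    -- both sides are l.replace(p0.1, ·) with equal replacement strings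
    simp only [if_pos (reps_fst_ne_empty p0 hp0mem), reps_build p0 hp0mem]
  · -- no digit word occurs: both return l
    have hA : pvWordList.foldl (stepA cs) ((PySem.Str.len l), "") = ((PySem.Str.len l), "") := by
      apply fold_no_update
      intro w hwm hcond
      obtain ⟨p, hpm, hpw⟩ := wordList_covered w hwm
      have hin : w.toList <:+: cs := (PySem.Chars.find_nonneg_iff _ _).mp hcond.1
      obtain ⟨i, hpre⟩ : ∃ i, w.toList <+: cs.drop i := by
        exact (PySem.Chars.exists_prefix_drop_iff_isIn w.toList cs).mpr
          ((PySem.Chars.isIn_iff_infix w.toList cs).mpr hin)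
      exact hex ⟨i, p, hpm, hpw.symm ▸ hpre⟩
    rw [hA]
    have hB : (List.range cs.length).findSome? (fun pos =>
        pvReps.find? (fun p => PySem.Chars.startswith (cs.drop pos) p.1.toList)) = none := by
      apply findSome?_range_none
      intro i _
      apply List.find?_eq_none.mpr
      intro p hpm hpp
      exact hex ⟨i, p, hpm, (PySem.Chars.startswith_iff _ _).mp hpp⟩
    rw [hB]
    simp
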